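-- pv_equiv track=rewrite | github.com/catsymptote/Kodesonen | app/set1/difficulty1/task4.py | double_match
-- ===== SOURCE A (Python) =====
-- def double_balance(balance, w1, w2):
--     """Checks if weight 1 and weight 2 creates
--     a double weight value solution."""
--     if balance[0]           == balance[1] + w1 + w2:
--         return True
--     elif balance[1]         == balance[0] + w1 + w2:
--         return True
--     elif balance[0] + w1    == balance[1] + w2:
--         return True
--     elif balance[0] + w2    == balance[1] + w1:
--         return True
--     else:
--         return False
--
-- def double_match(balance, weights):
--     """Checks if there is a double weight value solution."""
--     for i1 in range(len(weights)):
--         remaining = weights.copy()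
--         w1 = remaining.pop(i1)
--         for i2 in range(len(remaining)):
--             w2 = remaining[i2]
--             if double_balance(balance, w1, w2):
--                 solution = [w1, w2]
--                 solution.sort()
--                 return solution
--     return None
-- ===== SOURCE B (Python) =====
-- def double_match(balance, weights):
--     """Solve each balance equation for the partner weight and find it
--     via a value -> (first, second occurrence index) map built once."""
--     if len(weights) < 2:
--         return None
--     d = balance[0] - balance[1]
--     occ = {}  # value -> (first index, second index or None)
--     for i, w in enumerate(weights):
--         if w not in occ:
--             occ[w] = (i, None)
--         elif occ[w][1] is None:
--             occ[w] = (occ[w][0], i)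
--     for i1, w1 in enumerate(weights):
--         best_j = None
--         best_w2 = None
--         for t in (d - w1, -d - w1, d + w1, w1 - d):
--             pair = occ.get(t)
--             if pair is None:
--                 continue
--             j = pair[0] if pair[0] != i1 else pair[1]
--             if j is not None and (best_j is None or j < best_j):
--                 best_j, best_w2 = j, t
--         if best_j is not None:
--             return [w1, best_w2] if w1 <= best_w2 else [best_w2, w1]
--     return None
-- ===== Notes on version B (the rewrite author's own statement) =====
-- stated objective: alternative
-- what changed: A scans all ordered pairs of distinct weights testing four balance equations per pair; B solves each equation for the partner weight and finds the earliest partner via a value -> (first, second occurrence index) map built once, one O(1) lookup per target instead of an inner scan.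
import Mathlib
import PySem

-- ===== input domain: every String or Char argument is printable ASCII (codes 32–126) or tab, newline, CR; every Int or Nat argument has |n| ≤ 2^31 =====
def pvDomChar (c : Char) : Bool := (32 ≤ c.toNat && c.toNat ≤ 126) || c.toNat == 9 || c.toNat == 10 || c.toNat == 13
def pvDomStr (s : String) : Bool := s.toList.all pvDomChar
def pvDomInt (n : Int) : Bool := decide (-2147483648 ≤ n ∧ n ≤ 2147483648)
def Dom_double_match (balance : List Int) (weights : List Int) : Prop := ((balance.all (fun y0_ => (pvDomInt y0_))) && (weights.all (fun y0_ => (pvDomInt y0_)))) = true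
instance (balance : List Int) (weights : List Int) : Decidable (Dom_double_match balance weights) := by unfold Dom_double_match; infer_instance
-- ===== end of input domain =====

-- B replaces A's all-pairs scan by solving each balance equation for the partner
-- weight and looking it up in a value → (first,second occurrence index) map built
-- once (objective: alternative).

-- ===== PORT A =====
-- balance[0]/balance[1] ported with pyGetD (exact whenever Pre_ holds: there they are in range)
def double_balance (balance : List Int) (w1 w2 : Int) : Bool :=
  let b0 := PySem.List.pyGetD balance 0 0
  let b1 := PySem.List.pyGetD balance 1 0
  if b0 == b1 + w1 + w2 then true
  else if b1 == b0 + w1 + w2 then true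
  else if b0 + w1 == b1 + w2 then true
  else if b0 + w2 == b1 + w1 then true
  else false

def dmInnerA (balance : List Int) (w1 : Int) (remaining : List Int) : List Int → Option (List Int)
  | [] => none
  | i2 :: rest =>
    let w2 := PySem.List.pyGetD remaining i2 0
    if double_balance balance w1 w2 then
      some (PySem.List.sorted [w1, w2] (fun x => x) false)
    else dmInnerA balance w1 remaining rest

def dmOuterA (balance : List Int) (weights : List Int) : List Int → Option (List Int)
  | [] => none
  | i1 :: rest =>
    match PySem.List.pop? weights i1 with
    | none => none  -- unreachable: i1 ∈ range(len(weights))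
    | some (w1, remaining) =>
      match dmInnerA balance w1 remaining (PySem.List.pyRange 0 remaining.length 1) with
      | some s => some s
      | none => dmOuterA balance weights rest

def double_match (balance : List Int) (weights : List Int) : Option (List Int) :=
  dmOuterA balance weights (PySem.List.pyRange 0 weights.length 1)

-- ===== PORT B =====
def occStep (occ : PySem.Dict Int (Int × Option Int)) (iw : Int × Int) : PySem.Dict Int (Int × Option Int) :=
  match occ.get? iw.2 with
  | none => occ.insert iw.2 (iw.1, none)
  | some (a, none) => occ.insert iw.2 (a, some iw.1)
  | some _ => occ

def buildOcc (weights : List Int) : PySem.Dict Int (Int × Option Int) :=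
  (PySem.List.enumerate weights 0).foldl occStep PySem.Dict.empty

def bestStep (occ : PySem.Dict Int (Int × Option Int)) (i1 : Int)
    (best : Option (Int × Int)) (t : Int) : Option (Int × Int) :=
  match occ.get? t with
  | none => best
  | some (a, b) =>
    match (if a ≠ i1 then some a else b) with
    | none => best
    | some j =>
      match best with
      | none => some (j, t)
      | some (bj, _) => if j < bj then some (j, t) else best

def dmOuterB (d : Int) (occ : PySem.Dict Int (Int × Option Int)) : List (Int × Int) → Option (List Int)
  | [] => none
  | (i1, w1) :: rest =>
    match [d - w1, -d - w1, d + w1, w1 - d].foldl (bestStep occ i1) none with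
    | none => dmOuterB d occ rest
    | some (_, w2) => some (if w1 ≤ w2 then [w1, w2] else [w2, w1])

def double_match_alt (balance : List Int) (weights : List Int) : Option (List Int) :=
  if weights.length < 2 then none
  else
    let d := PySem.List.pyGetD balance 0 0 - PySem.List.pyGetD balance 1 0
    dmOuterB d (buildOcc weights) (PySem.List.enumerate weights 0)

-- ===== PRECONDITION & SPEC =====
-- Pre_ excludes exactly the inputs on which the Python A raises IndexError:
-- with at least two weights it reads balance[0] and balance[1].
def Pre_double_match (balance : List Int) (weights : List Int) : Prop :=
  2 ≤ weights.length → 2 ≤ balance.length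
instance (balance : List Int) (weights : List Int) : Decidable (Pre_double_match balance weights) := by
  unfold Pre_double_match; infer_instance

def pvWitness_double_match : List Int × List Int := ([8, 2], [1, 2, 3])

def Spec_double_match (balance : List Int) (weights : List Int) (out : Option (List Int)) : Prop := out = double_match_alt balance weights
instance (balance : List Int) (weights : List Int) (out : Option (List Int)) : Decidable (Spec_double_match balance weights out) := by unfold Spec_double_match; infer_instance

-- ===== CLAIM (what is proved, stated in full; the proofs are below) =====
def Claim_equal_double_match : Prop := ∀ (balance : List Int) (weights : List Int), Dom_double_match balance weights → Pre_double_match balance weights → Spec_double_match balance weights (double_match balance weights)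

-- ===== LEMMAS AND PROOFS =====

-- target values: w2 solves one of the four balance equations iff w2 ∈ targets d w1
def targets (d w1 : Int) : List Int := [d - w1, -d - w1, d + w1, w1 - d]

-- first (index, value) pair in e with index ≠ i1 and value ∈ ts
def firstHit (i1 : Int) (ts : List Int) : List (Int × Int) → Option (Int × Int)
  | [] => none
  | (i, w) :: rest => if i ≠ i1 ∧ w ∈ ts then some (i, w) else firstHit i1 ts rest

-- first index in e holding value t
def firstIdxP (t : Int) : List (Int × Int) → Option Int
  | [] => none
  | (i, w) :: rest => if w = t then some i else firstIdxP t rest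

-- first and second occurrence indices of t
def firstTwo (t : Int) : List (Int × Int) → Option (Int × Option Int)
  | [] => none
  | (i, w) :: rest => if w = t then some (i, firstIdxP t rest) else firstTwo t rest

-- first index ≠ i1 holding value t (structural form)
def fNe (i1 t : Int) : List (Int × Int) → Option Int
  | [] => none
  | (i, w) :: rest => if w = t ∧ i ≠ i1 then some i else fNe i1 t rest

def occCombine (t : Int) (cur : Option (Int × Option Int)) (e : List (Int × Int)) : Option (Int × Option Int) :=
  match cur with
  | none => firstTwo t e
  | some (a, none) => some (a, firstIdxP t e)
  | some (a, some b) => some (a, some b)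

-- right-fold min over targets, earlier target wins ties
def recMin (f : Int → Option Int) : List Int → Option (Int × Int)
  | [] => none
  | t :: ts =>
    match f t, recMin f ts with
    | none, r => r
    | some j, none => some (j, t)
    | some j, some (bj, bt) => if j ≤ bj then some (j, t) else some (bj, bt)

def mergeAcc (acc r : Option (Int × Int)) : Option (Int × Int) :=
  match acc, r with
  | none, r => r
  | some p, none => some p
  | some (bj, bt), some (j, t) => if j < bj then some (j, t) else some (bj, bt)

-- value first ∈ ts, scanning values only
def firstVal (ts : List Int) : List Int → Option Int
  | [] => none
  | w :: rest => if w ∈ ts then some w else firstVal ts rest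

theorem occ_char (t : Int) (e : List (Int × Int)) (D : PySem.Dict Int (Int × Option Int)) :
    (e.foldl occStep D).get? t = occCombine t (D.get? t) e := by
  induction e generalizing D with
  | nil =>
    rcases hD : D.get? t with _ | ⟨a, b⟩
    · simp [occCombine, firstTwo, hD]
    · rcases b with _ | b <;> simp [occCombine, firstIdxP, hD]
  | cons p rest ih =>
    obtain ⟨i, w⟩ := p
    rw [List.foldl_cons, ih]
    by_cases hw : w = t
    · subst hw
      rcases hDt : D.get? w with _ | ⟨a, b⟩
      · simp only [occStep, hDt]
        rw [PySem.Dict.get?_insert_self]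
        simp [occCombine, firstTwo, firstIdxP]
      · rcases b with _ | b
        · simp only [occStep, hDt]
          rw [PySem.Dict.get?_insert_self]
          simp [occCombine, firstTwo, firstIdxP]
        · simp only [occStep, hDt]
          simp [occCombine]
    · have hstep : (occStep D (i, w)).get? t = D.get? t := by
        simp only [occStep]
        rcases hDw : D.get? w with _ | ⟨a, b⟩
        · exact PySem.Dict.get?_insert_of_ne _ _ (fun hh => hw hh.symm)
        · rcases b with _ | b
          · exact PySem.Dict.get?_insert_of_ne _ _ (fun hh => hw hh.symm)
          · rfl
      rw [hstep]
      rcases hDt : D.get? t with _ | ⟨a, b⟩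
      · simp [occCombine, firstTwo, hw]
      · rcases b with _ | b <;> simp [occCombine, firstIdxP, hw]

theorem mergeAcc_assoc (a b c : Option (Int × Int)) :
    mergeAcc (mergeAcc a b) c = mergeAcc a (mergeAcc b c) := by
  rcases a with _ | ⟨aj, at'⟩ <;> rcases b with _ | ⟨bj, bt⟩ <;> rcases c with _ | ⟨cj, ct⟩ <;>
    try rfl
  · simp only [mergeAcc]; split_ifs <;> rfl
  · by_cases h1 : bj < aj <;> by_cases h2 : cj < bj
    · have h3 : cj < aj := by omega
      simp [mergeAcc, h1, h2, h3]
    · simp [mergeAcc, h1, h2]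
    · simp [mergeAcc, h1, h2]
    · have h3 : ¬ cj < aj := by omega
      simp [mergeAcc, h1, h2, h3]

theorem recMin_cons_merge (f : Int → Option Int) (t : Int) (ts : List Int) :
    recMin f (t :: ts) = mergeAcc ((f t).map (fun j => (j, t))) (recMin f ts) := by
  rcases hf : f t with _ | j <;> rcases hr : recMin f ts with _ | ⟨bj, bt⟩ <;>
    simp only [recMin, hf, hr, Option.map, mergeAcc]
  by_cases h : j ≤ bj
  · rw [if_pos h, if_neg (by omega)]
  · rw [if_neg h, if_pos (by omega)]

theorem fold_best (occ : PySem.Dict Int (Int × Option Int)) (i1 : Int) (e : List (Int × Int))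
    (hocc : ∀ t, occ.get? t = firstTwo t e) (ts : List Int) (acc : Option (Int × Int)) :
    ts.foldl (bestStep occ i1) acc =
      mergeAcc acc (recMin (fun t => match firstTwo t e with
        | none => none
        | some (a, b) => if a ≠ i1 then some a else b) ts) := by
  induction ts generalizing acc with
  | nil => rcases acc with _ | ⟨bj, bt⟩ <;> rfl
  | cons t ts ih =>
    have hstep : bestStep occ i1 acc t =
        mergeAcc acc (((match firstTwo t e with
          | none => none
          | some (a, b) => if a ≠ i1 then some a else b) : Option Int).map (fun j => (j, t))) := by
      simp only [bestStep, hocc t]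
      rcases firstTwo t e with _ | ⟨a, b⟩
      · rcases acc with _ | ⟨bj, bt⟩ <;> rfl
      · rcases hj : (if a ≠ i1 then some a else b) with _ | j <;>
          rcases acc with _ | ⟨bj, bt⟩ <;> simp [hj, mergeAcc]
    rw [List.foldl_cons, ih, hstep, recMin_cons_merge]
    exact mergeAcc_assoc _ _ _

theorem firstIdxP_eq_fNe (i1 t : Int) (e : List (Int × Int)) (h : ∀ p ∈ e, p.1 ≠ i1) :
    firstIdxP t e = fNe i1 t e := by
  induction e with
  | nil => rfl
  | cons p rest ih =>
    obtain ⟨i, w⟩ := p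
    have hi : i ≠ i1 := h (i, w) (by simp)
    have hrest := ih (fun p hp => h p (by simp [hp]))
    by_cases hw : w = t <;> simp [firstIdxP, fNe, hw, hi, hrest]

theorem firstTwo_proj_eq_fNe (i1 t : Int) (e : List (Int × Int))
    (h : e.Pairwise (fun p q => p.1 < q.1)) :
    (match firstTwo t e with
      | none => none
      | some (a, b) => if a ≠ i1 then some a else b) = fNe i1 t e := by
  induction e with
  | nil => rfl
  | cons p rest ih =>
    obtain ⟨i, w⟩ := p
    obtain ⟨hlt, hrest⟩ := List.pairwise_cons.mp h
    by_cases hw : w = t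
    · by_cases hi : i ≠ i1
      · simp [firstTwo, fNe, hw, hi]
      · push Not at hi
        have hne : ∀ p ∈ rest, p.1 ≠ i1 := fun p hp => by
          have := hlt p hp; omega
        simp [firstTwo, fNe, hw, hi, firstIdxP_eq_fNe i1 t rest hne]
    · simp only [firstTwo, fNe, if_neg hw, if_neg (by tauto : ¬(w = t ∧ i ≠ i1))]
      exact ih hrest

theorem recMin_congr (f g : Int → Option Int) (ts : List Int) (h : ∀ t ∈ ts, f t = g t) :
    recMin f ts = recMin g ts := by
  induction ts with
  | nil => rfl
  | cons t ts ih =>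
    simp only [recMin, h t (by simp), ih (fun t ht => h t (by simp [ht]))]

theorem recMin_none (f : Int → Option Int) (ts : List Int) (h : ∀ t ∈ ts, f t = none) :
    recMin f ts = none := by
  induction ts with
  | nil => rfl
  | cons t ts ih =>
    simp only [recMin, h t (by simp), ih (fun t ht => h t (by simp [ht]))]

theorem recMin_src (f : Int → Option Int) (ts : List Int) (j t : Int)
    (h : recMin f ts = some (j, t)) : t ∈ ts ∧ f t = some j := by
  induction ts with
  | nil => simp [recMin] at h
  | cons t' ts ih =>
    rcases hf : f t' with _ | j' <;> rcases hr : recMin f ts with _ | ⟨bj, bt⟩ <;>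
      simp only [recMin, hf, hr] at h
    · simp at h
    · obtain ⟨rfl, rfl⟩ := Prod.ext_iff.mp (Option.some.inj h)
      rcases ih hr with ⟨h1, h2⟩
      exact ⟨List.mem_cons_of_mem _ h1, h2⟩
    · obtain ⟨rfl, rfl⟩ := Prod.ext_iff.mp (Option.some.inj h)
      exact ⟨List.mem_cons_self, hf⟩
    · split at h
      · obtain ⟨rfl, rfl⟩ := Prod.ext_iff.mp (Option.some.inj h)
        exact ⟨List.mem_cons_self, hf⟩
      · obtain ⟨rfl, rfl⟩ := Prod.ext_iff.mp (Option.some.inj h)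
        rcases ih hr with ⟨h1, h2⟩
        exact ⟨List.mem_cons_of_mem _ h1, h2⟩

theorem recMin_hit (f : Int → Option Int) (ts : List Int) (i w : Int)
    (hw : w ∈ ts) (hfw : f w = some i)
    (hmin : ∀ t ∈ ts, ∀ j, f t = some j → i ≤ j ∧ (j = i → t = w)) :
    recMin f ts = some (i, w) := by
  induction ts with
  | nil => simp at hw
  | cons t' ts ih =>
    have ih' := fun hw2 => ih hw2 (fun t ht j hj => hmin t (List.mem_cons_of_mem _ ht) j hj)
    rcases hf : f t' with _ | j' <;> rcases hr : recMin f ts with _ | ⟨bj, bt⟩ <;>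
      simp only [recMin, hf, hr]
    · rcases List.mem_cons.mp hw with rfl | hw2
      · rw [hf] at hfw; simp at hfw
      · rw [ih' hw2] at hr; simp at hr
    · rcases List.mem_cons.mp hw with rfl | hw2
      · rw [hf] at hfw; simp at hfw
      · rw [ih' hw2] at hr; exact hr.symm
    · rcases List.mem_cons.mp hw with rfl | hw2
      · rw [hf] at hfw; rw [Option.some.inj hfw]
      · rw [ih' hw2] at hr; simp at hr
    · rcases List.mem_cons.mp hw with rfl | hw2
      · obtain rfl := Option.some.inj (hf ▸ hfw)
        have hbt := recMin_src f ts bj bt hr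
        have := hmin bt (List.mem_cons_of_mem _ hbt.1) bj hbt.2
        rw [if_pos this.1]
      · rw [ih' hw2] at hr
        obtain ⟨rfl, rfl⟩ := Prod.ext_iff.mp (Option.some.inj hr)
        have ht' := hmin t' List.mem_cons_self j' hf
        split
        · next hle =>
          have hji : j' = i := le_antisymm hle ht'.1
          rw [hji, ht'.2 hji]
        · rfl

theorem fNe_src (i1 t : Int) (e : List (Int × Int)) (j : Int) (h : fNe i1 t e = some j) :
    ∃ w, (j, w) ∈ e := by
  induction e with
  | nil => simp [fNe] at h
  | cons p rest ih =>
    obtain ⟨i, w⟩ := p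
    simp only [fNe] at h
    split at h
    · simp only [Option.some.injEq] at h; exact ⟨w, by simp [h]⟩
    · rcases ih h with ⟨w', hw'⟩; exact ⟨w', by simp [hw']⟩

theorem recMin_eq_firstHit (i1 : Int) (ts : List Int) (e : List (Int × Int))
    (h : e.Pairwise (fun p q => p.1 < q.1)) :
    recMin (fun t => fNe i1 t e) ts = firstHit i1 ts e := by
  induction e with
  | nil => exact recMin_none _ _ (fun t _ => rfl)
  | cons p rest ih =>
    obtain ⟨i, w⟩ := p
    obtain ⟨hlt, hrest⟩ := List.pairwise_cons.mp h
    by_cases hcase : i ≠ i1 ∧ w ∈ ts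
    · simp only [firstHit, if_pos hcase]
      apply recMin_hit _ _ i w hcase.2
      · simp [fNe, hcase.1]
      · intro t ht j hj
        simp only [fNe] at hj
        split at hj
        · next hcond =>
          obtain rfl := Option.some.inj hj
          exact ⟨le_refl i, fun _ => hcond.1.symm⟩
        · obtain ⟨w', hw'⟩ := fNe_src i1 t rest j hj
          have hij := hlt (j, w') hw'
          exact ⟨le_of_lt hij, fun hji => absurd (hji ▸ hij) (lt_irrefl _)⟩
    · simp only [firstHit, if_neg hcase]
      rw [recMin_congr (fun t => fNe i1 t ((i, w) :: rest)) (fun t => fNe i1 t rest) ts ?_,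
        ih hrest]
      intro t ht
      have hfalse : ¬(w = t ∧ i ≠ i1) := by
        rintro ⟨rfl, hi⟩; exact hcase ⟨hi, ht⟩
      simp only [fNe, if_neg hfalse]

theorem db_iff (balance : List Int) (w1 w2 : Int) :
    double_balance balance w1 w2 =
      decide (w2 ∈ targets (PySem.List.pyGetD balance 0 0 - PySem.List.pyGetD balance 1 0) w1) := by
  simp only [double_balance, targets]
  split_ifs <;> simp_all <;> omega

theorem innerA_eq (balance : List Int) (w1 : Int) (s pre : List Int) :
    dmInnerA balance w1 (pre ++ s) (PySem.List.pyRange pre.length (pre ++ s).length 1) =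
      match firstVal (targets (PySem.List.pyGetD balance 0 0 - PySem.List.pyGetD balance 1 0) w1) s with
      | none => none
      | some w2 => some (PySem.List.sorted [w1, w2] (fun x => x) false) := by
  induction s generalizing pre with
  | nil => simp [dmInnerA, firstVal, PySem.List.pyRange_one_eq_nil]
  | cons w s' ih =>
    have hlt : (pre.length : Int) < ((pre ++ w :: s').length : Int) := by simp
    rw [PySem.List.pyRange_one_cons hlt]
    simp only [dmInnerA]
    have hw2 : PySem.List.pyGetD (pre ++ w :: s') (pre.length : Int) 0 = w := by
      rw [PySem.List.pyGetD_natCast]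
      rw [List.getD_eq_getElem?_getD, List.getElem?_append_right (le_refl _)]
      simp
    rw [hw2, db_iff]
    by_cases hmem : w ∈ targets (PySem.List.pyGetD balance 0 0 - PySem.List.pyGetD balance 1 0) w1
    · simp [firstVal, hmem]
    · simp only [firstVal, decide_eq_true_eq, hmem, if_false]
      have hre : pre ++ w :: s' = (pre ++ [w]) ++ s' := by simp
      have hlen : (pre.length : Int) + 1 = ((pre ++ [w]).length : Int) := by simp
      rw [hre, hlen]
      exact ih (pre ++ [w])

theorem firstHit_lo (ts : List Int) (xs : List Int) (s i1 : Int) (h : i1 < s) :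
    (firstHit i1 ts (PySem.List.enumerate xs s)).map Prod.snd = firstVal ts xs := by
  induction xs generalizing s with
  | nil => rfl
  | cons x xs ih =>
    rw [PySem.List.enumerate_cons]
    simp only [firstHit, firstVal]
    have hne : s ≠ i1 := by omega
    by_cases hx : x ∈ ts <;> simp [hne, hx, ih (s + 1) (by omega)]

theorem erase_eq_firstHit (ts : List Int) (xs : List Int) (n : Nat) (s : Int)
    (hn : n < xs.length) :
    firstVal ts (xs.eraseIdx n) = (firstHit (s + n) ts (PySem.List.enumerate xs s)).map Prod.snd := by
  induction xs generalizing n s with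
  | nil => simp at hn
  | cons x xs ih =>
    rcases n with _ | n
    · rw [List.eraseIdx_cons_zero, PySem.List.enumerate_cons]
      simp only [firstHit]
      have : ¬(s ≠ s + (0 : Nat) ∧ x ∈ ts) := by simp
      rw [if_neg this]
      rw [← firstHit_lo ts xs (s + 1) (s + (0 : Nat)) (by simp)]
    · rw [List.eraseIdx_cons_succ, PySem.List.enumerate_cons]
      simp only [firstHit, firstVal]
      have hne : s ≠ s + ((n + 1 : Nat) : Int) := by push_cast; omega
      by_cases hx : x ∈ ts
      · rw [if_pos hx, if_pos ⟨hne, hx⟩]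
        rfl
      · simp only [hx, if_false, and_false, if_neg (by tauto : ¬(s ≠ s + ((n+1:Nat):Int) ∧ x ∈ ts))]
        have : s + ((n + 1 : Nat) : Int) = (s + 1) + (n : Int) := by push_cast; omega
        rw [this]
        exact ih n (s + 1) (by simpa using hn)

theorem sorted_pair (a b : Int) :
    PySem.List.sorted [a, b] (fun x => x) false = if a ≤ b then [a, b] else [b, a] := by
  by_cases h : a ≤ b
  · rw [if_pos h]
    exact PySem.List.sorted_id_eq_of_perm_of_pairwise _ _ (List.Perm.refl _) (by simp [h])
  · rw [if_neg h]
    exact PySem.List.sorted_id_eq_of_perm_of_pairwise _ _ (List.Perm.swap _ _ _) (by simp; omega)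

theorem bestFor_eq (W : List Int) (i1 : Int) (ts : List Int) :
    ts.foldl (bestStep (buildOcc W) i1) none =
      firstHit i1 ts (PySem.List.enumerate W 0) := by
  have hocc : ∀ t, (buildOcc W).get? t = firstTwo t (PySem.List.enumerate W 0) := by
    intro t
    rw [buildOcc, occ_char t _ PySem.Dict.empty, PySem.Dict.get?_empty]
    rfl
  rw [fold_best (buildOcc W) i1 (PySem.List.enumerate W 0) hocc ts none]
  have hpair := PySem.List.pairwise_lt_enumerate (xs := W) (s := 0)
  rw [recMin_congr _ (fun t => fNe i1 t (PySem.List.enumerate W 0)) ts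
    (fun t _ => firstTwo_proj_eq_fNe i1 t _ hpair)]
  rw [recMin_eq_firstHit i1 ts _ hpair]
  rfl

theorem outer_eq (balance : List Int) (s pre : List Int) :
    dmOuterA balance (pre ++ s) (PySem.List.pyRange pre.length (pre ++ s).length 1) =
      dmOuterB (PySem.List.pyGetD balance 0 0 - PySem.List.pyGetD balance 1 0)
        (buildOcc (pre ++ s)) (PySem.List.enumerate s pre.length) := by
  induction s generalizing pre with
  | nil => simp [dmOuterA, dmOuterB, PySem.List.pyRange_one_eq_nil, PySem.List.enumerate_nil]
  | cons w s' ih =>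
    set d := PySem.List.pyGetD balance 0 0 - PySem.List.pyGetD balance 1 0 with hd
    set W := pre ++ w :: s' with hW
    have hlen : pre.length < W.length := by simp [hW]
    rw [PySem.List.pyRange_one_cons (by exact_mod_cast hlen)]
    simp only [dmOuterA]
    have hWn : W[pre.length]'hlen = w := by
      simp [hW]
    rw [PySem.List.pop?_natCast (xs := W) (n := pre.length) hlen]
    rw [hWn]
    dsimp only
    have hinn := innerA_eq balance w (W.eraseIdx pre.length) []
    simp only [List.nil_append, List.length_nil, Nat.cast_zero] at hinn
    rw [hinn]
    rw [erase_eq_firstHit (targets d w) W pre.length 0 hlen]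
    simp only [zero_add]
    rw [PySem.List.enumerate_cons]
    simp only [dmOuterB]
    rw [show [d - w, -d - w, d + w, w - d] = targets d w from rfl,
      bestFor_eq W ((pre.length : Nat) : Int) (targets d w)]
    rcases hFH : firstHit (pre.length : Int) (targets d w) (PySem.List.enumerate W 0)
      with _ | ⟨j, w2⟩
    · simp only [Option.map_none]
      have hre : W = (pre ++ [w]) ++ s' := by simp [hW]
      have hlen1 : ((pre.length : Int) + 1) = (((pre ++ [w]).length : Nat) : Int) := by simp
      rw [hlen1]
      calc dmOuterA balance W (PySem.List.pyRange ((pre ++ [w]).length : Int) (W.length : Int) 1)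
          = dmOuterB d (buildOcc ((pre ++ [w]) ++ s'))
              (PySem.List.enumerate s' ((pre ++ [w]).length : Int)) := by
            rw [← hre]
            exact hre ▸ ih (pre ++ [w])
        _ = dmOuterB d (buildOcc W) (PySem.List.enumerate s' ((pre ++ [w]).length : Int)) := by
            rw [← hre]
    · simp only [Option.map_some]
      rw [sorted_pair]

-- ===== VERDICT (by name: the statement is the Claim_ definition above) =====
theorem double_match_spec : Claim_equal_double_match := by
  intro balance weights _ _
  unfold Spec_double_match double_match double_match_alt
  by_cases h2 : weights.length < 2
  · rw [if_pos h2]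
    rcases weights with _ | ⟨x, tl⟩
    · rfl
    · rcases tl with _ | ⟨y, tl⟩
      · have h01 : ((0:Nat) : Int) < (([x] : List Int).length : Int) := by simp
        rw [show (([x] : List Int).length : Int) = ((0:Int) + 1) by simp] at h01 ⊢
        rw [PySem.List.pyRange_one_cons (by omega : (0:Int) < 0 + 1)]
        simp only [dmOuterA]
        rw [show PySem.List.pop? [x] (0 : Int) = some (x, []) from PySem.List.pop?_zero_cons x []]
        simp [dmInnerA, dmOuterA, PySem.List.pyRange_one_eq_nil]
      · simp at h2
  · rw [if_neg h2]
    have h := outer_eq balance weights []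
    simpa using h
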